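-- pv_equiv track=rewrite | github.com/riffsircar/blend-elites | get_label.py | get_label_ng
-- ===== SOURCE A (Python) =====
-- def get_label_ng(level):
-- 	#{'%': 0, ')': 1, '*': 2, '+': 3, '-': 4, '1': 5, 'A': 6, 'B': 7, 'C': 8, 'D': 9, 'E': 10, 'F': 11, 'J': 12, 'K': 13, 'L': 14, 'P': 15, 'R': 16, 'T': 17, 'W': 18, 'X': 19}
-- 	label = [False] * 5  # E, B/D/K/C, L, */J/A/F/W, +/)/1/R/T/% i.e. Enemy, Animal, Ladder, Weapons, Powerups
-- 	temp = ''
-- 	for l in level: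
-- 		temp += ''.join(l)
-- 	if 'E' in temp:
-- 		label[0] = True
-- 	if 'B' in temp or 'D' in temp or 'K' in temp or 'C' in temp:
-- 		label[1] = True
-- 	if 'L' in temp:
-- 		label[2] = True
-- 	if '*' in temp or 'J' in temp or 'A' in temp or 'F' in temp or 'W' in temp:
-- 		label[3] = True
-- 	if '+' in temp or ')' in temp or '1' in temp or 'R' in temp or 'T' in temp or '%' in temp:
-- 		label[4] = True
-- 	return label
-- ===== SOURCE B (Python) =====
-- CAT_INDEX = {'E': 0,
--              'B': 1, 'D': 1, 'K': 1, 'C': 1,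
--              'L': 2,
--              '*': 3, 'J': 3, 'A': 3, 'F': 3, 'W': 3,
--              '+': 4, ')': 4, '1': 4, 'R': 4, 'T': 4, '%': 4}
--
-- def get_label_ng(level):
--     label = [False] * 5
--     for l in level:
--         for c in ''.join(l):
--             i = CAT_INDEX.get(c)
--             if i is not None:
--                 label[i] = True
--     return label
-- ===== Notes on version B (the rewrite author's own statement) =====
-- stated objective: alternative
-- what changed: A concatenates all tiles into one big string and then runs 17 separate substring-membership scans over it; B makes a single pass over the characters, dispatching each through a precomputed char-to-category-index dict and setting the corresponding flag, so the concatenated temp string and the repeated scans disappear.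
import Mathlib
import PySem

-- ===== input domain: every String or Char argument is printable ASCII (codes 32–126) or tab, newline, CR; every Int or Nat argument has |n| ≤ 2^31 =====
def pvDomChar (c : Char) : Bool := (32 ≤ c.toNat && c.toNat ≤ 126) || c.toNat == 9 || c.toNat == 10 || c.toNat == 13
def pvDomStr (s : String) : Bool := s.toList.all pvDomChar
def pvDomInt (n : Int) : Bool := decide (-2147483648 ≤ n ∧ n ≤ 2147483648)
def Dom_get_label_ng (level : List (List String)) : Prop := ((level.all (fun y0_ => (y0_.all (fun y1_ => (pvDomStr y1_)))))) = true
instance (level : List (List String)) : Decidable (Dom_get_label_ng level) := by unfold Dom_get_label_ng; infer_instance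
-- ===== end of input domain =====

-- B replaces A's concatenate-then-17-membership-scans by a single pass that dispatches
-- each character through a char→category-index dict; same return value, one traversal.

-- ===== PORT A =====
-- A builds temp by '+='-ing ''.join(l) (ported on List Char, the PySem string carrier),
-- then performs five membership checks; 'if cond: label[i] = True' on an initially-False
-- cell is ported as that cell's value being cond (the checks are exactly Python's 'in').
def get_label_ng (level : List (List String)) : List Bool :=
  let temp : List Char :=
    level.foldl (fun t l => t ++ PySem.Chars.join [] (l.map String.toList)) []
  let lab0 := PySem.Chars.isIn ['E'] temp
  let lab1 := PySem.Chars.isIn ['B'] temp || PySem.Chars.isIn ['D'] temp ||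
              PySem.Chars.isIn ['K'] temp || PySem.Chars.isIn ['C'] temp
  let lab2 := PySem.Chars.isIn ['L'] temp
  let lab3 := PySem.Chars.isIn ['*'] temp || PySem.Chars.isIn ['J'] temp ||
              PySem.Chars.isIn ['A'] temp || PySem.Chars.isIn ['F'] temp ||
              PySem.Chars.isIn ['W'] temp
  let lab4 := PySem.Chars.isIn ['+'] temp || PySem.Chars.isIn [')'] temp ||
              PySem.Chars.isIn ['1'] temp || PySem.Chars.isIn ['R'] temp ||
              PySem.Chars.isIn ['T'] temp || PySem.Chars.isIn ['%'] temp
  [lab0, lab1, lab2, lab3, lab4]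

-- ===== PORT B =====
def pvCatIndex : PySem.Dict Char Nat :=
  PySem.Dict.ofList
    [('E', 0), ('B', 1), ('D', 1), ('K', 1), ('C', 1), ('L', 2),
     ('*', 3), ('J', 3), ('A', 3), ('F', 3), ('W', 3),
     ('+', 4), (')', 4), ('1', 4), ('R', 4), ('T', 4), ('%', 4)]

-- 'i = CAT_INDEX.get(c); if i is not None: label[i] = True'
def pvApplyChar (lab : List Bool) (c : Char) : List Bool :=
  match pvCatIndex.get? c with
  | some i => lab.set i true
  | none => lab

def get_label_ng_alt (level : List (List String)) : List Bool :=
  level.foldl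
    (fun lab l => (PySem.Chars.join [] (l.map String.toList)).foldl pvApplyChar lab)
    [false, false, false, false, false]

-- ===== PRECONDITION & SPEC =====
def Spec_get_label_ng (level : List (List String)) (out : List Bool) : Prop := out = get_label_ng_alt level
instance (level : List (List String)) (out : List Bool) : Decidable (Spec_get_label_ng level out) := by unfold Spec_get_label_ng; infer_instance

-- ===== CLAIM (what is proved, stated in full; the proofs are below) =====
def Claim_equal_get_label_ng : Prop := ∀ (level : List (List String)), Dom_get_label_ng level → Spec_get_label_ng level (get_label_ng level)

lemma pv_join_nil (parts : List (List Char)) :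
    PySem.Chars.join [] parts = parts.flatten := by
  induction parts with
  | nil => rfl
  | cons p ps ih =>
    simp [PySem.Chars.join, List.intercalate] at *
    cases ps <;> simp_all [List.intersperse]

lemma pv_isIn_singleton (c : Char) (cs : List Char) :
    PySem.Chars.isIn [c] cs = cs.contains c := by
  rw [Bool.eq_iff_iff, PySem.Chars.isIn_iff_infix, List.contains_iff_mem]
  exact List.singleton_infix_iff c cs

lemma pv_beq_comm (a b : Char) : (a == b) = (b == a) := by
  rw [Bool.eq_iff_iff, beq_iff_eq, beq_iff_eq]; exact eq_comm

lemma pv_get?_catIndex (x : Char) :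
    pvCatIndex.get? x = if x == 'E' then some 0 else if x == 'B' then some 1 else if x == 'D' then some 1 else if x == 'K' then some 1 else if x == 'C' then some 1 else if x == 'L' then some 2 else if x == '*' then some 3 else if x == 'J' then some 3 else if x == 'A' then some 3 else if x == 'F' then some 3 else if x == 'W' then some 3 else if x == '+' then some 4 else if x == ')' then some 4 else if x == '1' then some 4 else if x == 'R' then some 4 else if x == 'T' then some 4 else if x == '%' then some 4 else none := by
  rw [show pvCatIndex =
    (⟨[('E', 0), ('B', 1), ('D', 1), ('K', 1), ('C', 1), ('L', 2),
       ('*', 3), ('J', 3), ('A', 3), ('F', 3), ('W', 3),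
       ('+', 4), (')', 4), ('1', 4), ('R', 4), ('T', 4), ('%', 4)]⟩ : PySem.Dict Char Nat)
    from by decide]
  simp only [PySem.Dict.get?_mk_cons, pv_beq_comm]
  rfl

lemma pv_apply_eval (a b c d e : Bool) (x : Char) :
    pvApplyChar [a, b, c, d, e] x =
      [a || (x == 'E'),
       b || (x == 'B' || x == 'D' || x == 'K' || x == 'C'),
       c || (x == 'L'),
       d || (x == '*' || x == 'J' || x == 'A' || x == 'F' || x == 'W'),
       e || (x == '+' || x == ')' || x == '1' || x == 'R' || x == 'T' || x == '%')] := by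
  by_cases h1 : x = 'E'
  · subst h1
    simp [pvApplyChar, show pvCatIndex.get? 'E' = some 0 from by decide]
  by_cases h2 : x = 'B'
  · subst h2
    simp [pvApplyChar, show pvCatIndex.get? 'B' = some 1 from by decide]
  by_cases h3 : x = 'D'
  · subst h3
    simp [pvApplyChar, show pvCatIndex.get? 'D' = some 1 from by decide]
  by_cases h4 : x = 'K'
  · subst h4
    simp [pvApplyChar, show pvCatIndex.get? 'K' = some 1 from by decide]
  by_cases h5 : x = 'C'
  · subst h5
    simp [pvApplyChar, show pvCatIndex.get? 'C' = some 1 from by decide]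
  by_cases h6 : x = 'L'
  · subst h6
    simp [pvApplyChar, show pvCatIndex.get? 'L' = some 2 from by decide]
  by_cases h7 : x = '*'
  · subst h7
    simp [pvApplyChar, show pvCatIndex.get? '*' = some 3 from by decide]
  by_cases h8 : x = 'J'
  · subst h8
    simp [pvApplyChar, show pvCatIndex.get? 'J' = some 3 from by decide]
  by_cases h9 : x = 'A'
  · subst h9
    simp [pvApplyChar, show pvCatIndex.get? 'A' = some 3 from by decide]
  by_cases h10 : x = 'F'
  · subst h10
    simp [pvApplyChar, show pvCatIndex.get? 'F' = some 3 from by decide]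
  by_cases h11 : x = 'W'
  · subst h11
    simp [pvApplyChar, show pvCatIndex.get? 'W' = some 3 from by decide]
  by_cases h12 : x = '+'
  · subst h12
    simp [pvApplyChar, show pvCatIndex.get? '+' = some 4 from by decide]
  by_cases h13 : x = ')'
  · subst h13
    simp [pvApplyChar, show pvCatIndex.get? ')' = some 4 from by decide]
  by_cases h14 : x = '1'
  · subst h14
    simp [pvApplyChar, show pvCatIndex.get? '1' = some 4 from by decide]
  by_cases h15 : x = 'R'
  · subst h15
    simp [pvApplyChar, show pvCatIndex.get? 'R' = some 4 from by decide]
  by_cases h16 : x = 'T'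
  · subst h16
    simp [pvApplyChar, show pvCatIndex.get? 'T' = some 4 from by decide]
  by_cases h17 : x = '%'
  · subst h17
    simp [pvApplyChar, show pvCatIndex.get? '%' = some 4 from by decide]
  have hn : pvCatIndex.get? x = none := by
    rw [pv_get?_catIndex]
    simp [beq_iff_eq, h1, h2, h3, h4, h5, h6, h7, h8, h9, h10, h11, h12, h13, h14, h15, h16, h17]
  simp [pvApplyChar, hn, beq_iff_eq, h1, h2, h3, h4, h5, h6, h7, h8, h9, h10, h11, h12, h13, h14, h15, h16, h17]

def pvClosed (cs : List Char) (a b c d e : Bool) : List Bool :=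
  [a || cs.contains 'E',
   b || (cs.contains 'B' || cs.contains 'D' || cs.contains 'K' || cs.contains 'C'),
   c || cs.contains 'L',
   d || (cs.contains '*' || cs.contains 'J' || cs.contains 'A' || cs.contains 'F' || cs.contains 'W'),
   e || (cs.contains '+' || cs.contains ')' || cs.contains '1' || cs.contains 'R' || cs.contains 'T' || cs.contains '%')]

lemma pv_foldl_apply (cs : List Char) (a b c d e : Bool) :
    cs.foldl pvApplyChar [a, b, c, d, e] = pvClosed cs a b c d e := by
  induction cs generalizing a b c d e with
  | nil => simp [pvClosed]
  | cons x xs ih =>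
    rw [List.foldl_cons, pv_apply_eval, ih]
    simp only [pvClosed, List.contains_cons, pv_beq_comm, Bool.or_assoc, Bool.or_comm,
      Bool.or_left_comm]

lemma pv_outer (level : List (List String)) (a b c d e : Bool) :
    level.foldl
      (fun lab l => (PySem.Chars.join [] (l.map String.toList)).foldl pvApplyChar lab)
      [a, b, c, d, e]
    = pvClosed ((level.map (fun l => (l.map String.toList).flatten)).flatten) a b c d e := by
  induction level generalizing a b c d e with
  | nil => simp [pvClosed]
  | cons l ls ih =>
    rw [List.foldl_cons, pv_join_nil, pv_foldl_apply]
    simp only [pvClosed]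
    rw [ih]
    simp only [pvClosed, List.map_cons, List.flatten_cons, List.contains_append,
      Bool.or_assoc, Bool.or_comm, Bool.or_left_comm]

-- ===== VERDICT (by name: the statement is the Claim_ definition above) =====
theorem get_label_ng_spec : Claim_equal_get_label_ng := by
  intro level _
  unfold Spec_get_label_ng get_label_ng get_label_ng_alt
  rw [pv_outer]
  simp only [pv_join_nil]
  rw [show level.foldl (fun t l => t ++ (l.map String.toList).flatten) [] =
      (level.map (fun l => (l.map String.toList).flatten)).flatten from by
    rw [← List.foldl_map, PySem.List.foldl_append_eq_flatten]; simp]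
  simp only [pvClosed, pv_isIn_singleton, Bool.false_or, Bool.or_assoc, Bool.or_comm,
    Bool.or_left_comm]
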